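-- pv_equiv track=rewrite | github.com/marclamb/PublicProjects | FastPrimeNumberFinder/primeFinder.py | compute_L
-- ===== SOURCE A (Python) =====
-- from typing import List, Set
--
-- def compute_L(roots: List[int]) -> List[Set[int]]:
--     """
--     For each root r_i, compute the set L[i] of cycle-indices ℓ = 1 + (q*·r_i - q)/210
--     where q and q* run over all roots giving a multiple of 210.
--     """
--     L: List[Set[int]] = []
--     for r in roots:
--         Li: Set[int] = set()
--         for q in roots:
--             for q_hat in roots:
--                 diff = q_hat * r - q
--                 if diff % 210 == 0:
--                     ℓ = 1 + diff // 210
--                     Li.add(ℓ)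
--                     break
--         L.append(Li)
--     return L
-- ===== SOURCE B (Python) =====
-- def _row(r, roots):
--     # first q_hat per residue class (q_hat * r) % 210, built once
--     first = {}
--     for q_hat in roots:
--         c = (q_hat * r) % 210
--         if c not in first:
--             first[c] = q_hat
--     Li = set()
--     for q in roots:
--         q_hat = first.get(q % 210)
--         if q_hat is not None:
--             Li.add(1 + (q_hat * r - q) // 210)
--     return Li
--
-- def compute_L(roots):
--     return [_row(r, roots) for r in roots]
-- ===== Notes on version B (the rewrite author's own statement) =====
-- stated objective: faster
-- what changed: Per root r, B builds once a dict mapping each residue class (q_hat*r) % 210 to the first q_hat in that class, so the per-q inner scan over all q_hat becomes an O(1) dict lookup.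
import Mathlib
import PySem

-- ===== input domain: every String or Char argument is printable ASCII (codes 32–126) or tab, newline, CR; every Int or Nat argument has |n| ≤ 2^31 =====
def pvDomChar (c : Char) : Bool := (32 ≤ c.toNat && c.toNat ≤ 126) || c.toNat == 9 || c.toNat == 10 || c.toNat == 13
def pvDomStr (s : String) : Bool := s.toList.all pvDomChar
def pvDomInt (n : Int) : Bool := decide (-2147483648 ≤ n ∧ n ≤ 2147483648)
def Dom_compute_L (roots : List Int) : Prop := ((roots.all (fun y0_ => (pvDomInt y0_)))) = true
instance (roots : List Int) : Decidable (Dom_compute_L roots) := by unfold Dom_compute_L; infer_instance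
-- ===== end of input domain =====

-- B replaces A's inner scan over all q_hat (per q) by a dict of first q_hat per residue class mod 210, built once per r: O(n^2) instead of O(n^3).

-- ===== PORT A =====
-- inner 'for q_hat in roots: … break' loop of A
def pvFindAdd (r q : Int) : List Int → PySem.Set Int → PySem.Set Int
  | [], Li => Li
  | h :: t, Li =>
    if PySem.Int.mod (h * r - q) 210 = 0 then
      PySem.Set.add Li (1 + PySem.Int.floordiv (h * r - q) 210)
    else pvFindAdd r q t Li

def compute_L (roots : List Int) : List (List Int) :=
  roots.foldl (fun L r =>
    L ++ [roots.foldl (fun Li q => pvFindAdd r q roots Li) PySem.Set.empty]) []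

-- ===== PORT B =====
-- first q_hat per residue class (q_hat * r) % 210, built once (Source B's first dict)
def pvFirstDict (r : Int) (roots : List Int) : PySem.Dict Int Int :=
  roots.foldl (fun d qh =>
    let c := PySem.Int.mod (qh * r) 210
    if d.contains c then d else d.insert c qh) PySem.Dict.empty

-- Source B's _row
def pvRow (r : Int) (roots : List Int) : PySem.Set Int :=
  let first := pvFirstDict r roots
  roots.foldl (fun Li q =>
    match first.get? (PySem.Int.mod q 210) with
    | some qh => PySem.Set.add Li (1 + PySem.Int.floordiv (qh * r - q) 210)
    | none => Li) PySem.Set.empty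

def compute_L_alt (roots : List Int) : List (List Int) :=
  roots.map (fun r => pvRow r roots)

-- ===== PRECONDITION & SPEC =====
def Spec_compute_L (roots : List Int) (out : List (List Int)) : Prop := out = compute_L_alt roots
instance (roots : List Int) (out : List (List Int)) : Decidable (Spec_compute_L roots out) := by unfold Spec_compute_L; infer_instance

-- ===== CLAIM (what is proved, stated in full; the proofs are below) =====
def Claim_equal_compute_L : Prop := ∀ (roots : List Int), Dom_compute_L roots → Spec_compute_L roots (compute_L roots)

-- ===== LEMMAS AND PROOFS =====

-- the first-match dict lookup is List.find? on the residue predicate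
theorem pvFirstDict_get? (r c : Int) (l : List Int) (d : PySem.Dict Int Int) :
    (l.foldl (fun d qh =>
      let c := PySem.Int.mod (qh * r) 210
      if d.contains c then d else d.insert c qh) d).get? c =
    match d.get? c with
    | some v => some v
    | none => l.find? (fun h => PySem.Int.mod (h * r) 210 == c) := by
  induction l generalizing d with
  | nil =>
    rw [List.foldl_nil]
    cases hdc : d.get? c <;> rfl
  | cons h t ih =>
    simp only [List.foldl_cons, List.find?_cons]
    by_cases hc : PySem.Int.mod (h * r) 210 = c
    · have hbeq : (PySem.Int.mod (h * r) 210 == c) = true := beq_iff_eq.mpr hc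
      simp only [hbeq]
      by_cases hd : d.contains (PySem.Int.mod (h * r) 210)
      · rw [if_pos hd, ih]
        rw [PySem.Dict.contains_eq_isSome_get?] at hd
        obtain ⟨v, hv⟩ := Option.isSome_iff_exists.mp hd
        rw [hc] at hv; rw [hv]
      · rw [if_neg hd, ih, PySem.Dict.get?_insert, if_pos hc.symm]
        rw [PySem.Dict.contains_eq_isSome_get?, hc] at hd
        rw [Option.not_isSome_iff_eq_none.mp hd]
    · have hbeq : (PySem.Int.mod (h * r) 210 == c) = false := beq_eq_false_iff_ne.mpr hc
      simp only [hbeq]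
      by_cases hd : d.contains (PySem.Int.mod (h * r) 210)
      · rw [if_pos hd, ih]
      · rw [if_neg hd, ih, PySem.Dict.get?_insert, if_neg (fun he => hc he.symm)]

-- A's break-loop is List.find? on its predicate
theorem pvFindAdd_eq_find? (r q : Int) (l : List Int) (Li : PySem.Set Int) :
    pvFindAdd r q l Li =
    match l.find? (fun h => PySem.Int.mod (h * r - q) 210 == 0) with
    | some h => PySem.Set.add Li (1 + PySem.Int.floordiv (h * r - q) 210)
    | none => Li := by
  induction l with
  | nil => rfl
  | cons h t ih =>
    rw [pvFindAdd, List.find?_cons]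
    by_cases hm : PySem.Int.mod (h * r - q) 210 = 0
    · simp only [if_pos hm, beq_iff_eq.mpr hm]
    · simp only [if_neg hm, beq_eq_false_iff_ne.mpr hm, ih]

-- the two predicates agree: (h*r - q) % 210 = 0 iff (h*r) % 210 = q % 210
theorem pvPred_iff (r q h : Int) :
    (PySem.Int.mod (h * r - q) 210 = 0) ↔
    (PySem.Int.mod (h * r) 210 = PySem.Int.mod q 210) := by
  rw [PySem.Int.mod_eq_emod_of_pos (by norm_num : (0:Int) < 210),
      PySem.Int.mod_eq_emod_of_pos (by norm_num : (0:Int) < 210),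
      PySem.Int.mod_eq_emod_of_pos (by norm_num : (0:Int) < 210)]
  omega

-- per root r, A's inner double loop equals B's row
theorem pvRow_eq (r : Int) (roots : List Int) :
    roots.foldl (fun Li q => pvFindAdd r q roots Li) PySem.Set.empty = pvRow r roots := by
  unfold pvRow pvFirstDict
  apply PySem.List.foldl_congr_mem
  intro Li q _
  rw [pvFindAdd_eq_find?, pvFirstDict_get?]
  rw [show (PySem.Dict.empty : PySem.Dict Int Int).get? (PySem.Int.mod q 210) = none from rfl]
  have : (fun h => PySem.Int.mod (h * r - q) 210 == 0) =
         (fun h => PySem.Int.mod (h * r) 210 == PySem.Int.mod q 210) := by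
    funext h
    rw [Bool.eq_iff_iff, beq_iff_eq, beq_iff_eq]
    exact pvPred_iff r q h
  rw [this]

-- ===== VERDICT (by name: the statement is the Claim_ definition above) =====
theorem compute_L_spec : Claim_equal_compute_L := by
  intro roots _
  unfold Spec_compute_L compute_L compute_L_alt
  rw [PySem.List.foldl_append_singleton_eq_map]
  exact List.map_congr_left (fun r _ => pvRow_eq r roots)
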